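-- pv_equiv track=rewrite | github.com/Grinnling/Holistic-Transparency-Memory-Engine | memory_system/working_memory/auth_integration.py | _detect_pattern_stuffing
-- ===== SOURCE A (Python) =====
-- def _detect_pattern_stuffing(text):
--     """Detect repeated patterns that could be context stuffing attacks"""
--     if len(text) < 100:
--         return False
--
--     # Check for excessive repetition of short patterns
--     chunks = [text[i:i+20] for i in range(0, len(text)-20, 10)]
--     chunk_counts = {}
--     for chunk in chunks:
--         chunk_counts[chunk] = chunk_counts.get(chunk, 0) + 1
--
--     # If any 20-char pattern repeats more than 10 times, it's suspicious
--     max_repetitions = max(chunk_counts.values()) if chunk_counts else 0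
--     return max_repetitions > 10
-- ===== SOURCE B (Python) =====
-- def _detect_pattern_stuffing(text):
--     """Detect repeated patterns that could be context stuffing attacks"""
--     if len(text) < 100:
--         return False
--
--     # Group equal 20-char chunks by sorting, then measure the longest run
--     chunks = sorted(text[i:i+20] for i in range(0, len(text) - 20, 10))
--     max_run = 0
--     run = 0
--     prev = None
--     for c in chunks:
--         run = run + 1 if c == prev else 1
--         prev = c
--         if run > max_run:
--             max_run = run
--     return max_run > 10
-- ===== Notes on version B (the rewrite author's own statement) =====
-- stated objective: alternative
-- what changed: Replaces the hash-map frequency count (dict of chunk counts, then max of values) by sort-and-scan grouping: the chunk list is sorted and a single pass tracks the longest run of equal adjacent chunks.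
import Mathlib
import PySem

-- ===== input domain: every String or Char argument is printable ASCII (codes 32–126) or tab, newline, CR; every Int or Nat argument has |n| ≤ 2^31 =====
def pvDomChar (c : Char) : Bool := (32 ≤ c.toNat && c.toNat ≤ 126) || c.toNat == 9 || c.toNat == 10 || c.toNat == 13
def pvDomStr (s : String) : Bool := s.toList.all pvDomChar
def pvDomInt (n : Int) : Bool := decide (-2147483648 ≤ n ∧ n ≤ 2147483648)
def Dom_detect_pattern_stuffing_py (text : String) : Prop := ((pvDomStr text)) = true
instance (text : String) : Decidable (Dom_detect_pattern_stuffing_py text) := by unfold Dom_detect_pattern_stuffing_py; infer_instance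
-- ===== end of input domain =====

-- B replaces A's dict-based frequency count by sorting the chunk list and scanning for the longest run of equal chunks (alternative algorithm, same result).

-- ===== PORT A =====
def detect_pattern_stuffing_py (text : String) : Bool :=
  if PySem.Str.len text < 100 then false
  else
    let chunks := (PySem.List.pyRange 0 (PySem.Str.len text - 20) 10).map
      (fun i => PySem.Str.slice text (some i) (some (i + 20)))
    let chunk_counts := chunks.foldl (fun d c => d.insert c (d.getD c 0 + 1))
      (PySem.Dict.empty : PySem.Dict String Int)
    let max_repetitions : Int :=
      if chunk_counts.items ≠ [] then
        (PySem.List.max? chunk_counts.values (fun v => v)).getD 0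
      else 0
    decide (max_repetitions > 10)

-- ===== PORT B =====
-- the run-length scan of Source B's for-loop
def pvRunLoop : List String → Option String → Int → Int → Int
  | [], _, _, max_run => max_run
  | c :: rest, prev, run, max_run =>
    let run' := if some c = prev then run + 1 else 1
    pvRunLoop rest (some c) run' (if run' > max_run then run' else max_run)

def detect_pattern_stuffing_py_alt (text : String) : Bool :=
  if PySem.Str.len text < 100 then false
  else
    let chunks := PySem.List.sorted
      ((PySem.List.pyRange 0 (PySem.Str.len text - 20) 10).map
        (fun i => PySem.Str.slice text (some i) (some (i + 20)))) (fun x => x) false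
    decide (pvRunLoop chunks none 0 0 > 10)

-- ===== PRECONDITION & SPEC =====
def Spec_detect_pattern_stuffing_py (text : String) (out : Bool) : Prop := out = detect_pattern_stuffing_py_alt text
instance (text : String) (out : Bool) : Decidable (Spec_detect_pattern_stuffing_py text out) := by unfold Spec_detect_pattern_stuffing_py; infer_instance

-- ===== CLAIM (what is proved, stated in full; the proofs are below) =====
def Claim_equal_detect_pattern_stuffing_py : Prop := ∀ (text : String), Dom_detect_pattern_stuffing_py text → Spec_detect_pattern_stuffing_py text (detect_pattern_stuffing_py text)

-- ===== LEMMAS AND PROOFS =====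

-- the maximum multiplicity of an element of l (0 for empty l)
def pvMaxCount (l : List String) : Int :=
  (PySem.List.dedup l).foldl (fun acc k => max acc ((l.count k : Int))) 0

theorem pvFoldlMaxInit (g : String → Int) (ds : List String) (a b : Int) :
    ds.foldl (fun acc k => max acc (g k)) (max a b)
      = max a (ds.foldl (fun acc k => max acc (g k)) b) := by
  induction ds generalizing b with
  | nil => rfl
  | cons d t ih =>
    simp only [List.foldl_cons, max_assoc]
    exact ih (max b (g d))

theorem pvMaxCount_nonneg (l : List String) : 0 ≤ pvMaxCount l :=
  (PySem.List.le_foldl_max_int (PySem.List.dedup l) (fun k => ((l.count k : Int))) 0).1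

theorem pvMaxCount_perm {l l' : List String} (h : l.Perm l') : pvMaxCount l = pvMaxCount l' := by
  unfold pvMaxCount
  have hd : (PySem.List.dedup l).Perm (PySem.List.dedup l') := by
    rw [List.perm_ext_iff_of_nodup (PySem.List.nodup_dedup l) (PySem.List.nodup_dedup l')]
    intro x
    simp only [PySem.List.mem_dedup]
    exact ⟨fun hx => h.mem_iff.mp hx, fun hx => h.mem_iff.mpr hx⟩
  have hcnt : ∀ k, l.count k = l'.count k := fun k => h.count_eq k
  calc (PySem.List.dedup l).foldl (fun acc k => max acc ((l.count k : Int))) 0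
      = (PySem.List.dedup l).foldl (fun acc k => max acc ((l'.count k : Int))) 0 := by
        apply PySem.List.foldl_congr_mem
        intro acc k _
        rw [hcnt]
    _ = (PySem.List.dedup l').foldl (fun acc k => max acc ((l'.count k : Int))) 0 := by
        apply hd.foldl_eq'
        intro x _ y _ z
        simp only [max_assoc]
        rw [max_comm ((l'.count x : Int))]

-- A's dict computation yields pvMaxCount
theorem pvASide (l : List String) :
    (if ((l.foldl (fun d c => d.insert c (d.getD c 0 + 1))
        (PySem.Dict.empty : PySem.Dict String Int)).items ≠ []) then
      (PySem.List.max? (l.foldl (fun d c => d.insert c (d.getD c 0 + 1))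
        (PySem.Dict.empty : PySem.Dict String Int)).values (fun v => v)).getD 0
    else 0) = pvMaxCount l := by
  rw [PySem.Dict.foldl_insert_getD_add_one_eq_counter]
  have hvals : (PySem.Dict.counter l).values
      = (PySem.List.dedup l).map (fun k => ((l.count k : Int))) := by
    show ((PySem.Dict.counter l).items.map (·.2)) = _
    rw [PySem.Dict.items_counter]
    simp [List.map_map, Function.comp]
  have hitems : (PySem.Dict.counter l).items
      = (PySem.List.dedup l).map (fun k => (k, (l.count k : Int))) := by
    rw [PySem.Dict.items_counter]; simp
  cases hdl : PySem.List.dedup l with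
  | nil =>
    have hl : l = [] := by
      cases l with
      | nil => rfl
      | cons a t =>
        exfalso
        have : a ∈ PySem.List.dedup (a :: t) := (PySem.List.mem_dedup _ _).mpr (by simp)
        rw [hdl] at this; simp at this
    subst hl
    have hl0 : (PySem.Dict.counter ([] : List String)).items = [] := by
      rw [hitems, hdl]; rfl
    rw [if_neg (by simp [hl0])]
    simp [pvMaxCount]
  | cons k0 ds =>
    have hne : (PySem.Dict.counter l).items ≠ [] := by
      rw [hitems, hdl]; simp
    rw [if_pos hne, hvals, hdl]
    simp only [List.map_cons]
    rw [PySem.List.max?_id_cons]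
    simp only [Option.getD_some]
    have hk0 : k0 ∈ l := by
      have : k0 ∈ PySem.List.dedup l := by rw [hdl]; simp
      exact (PySem.List.mem_dedup _ _).mp this
    have hpos : (0 : Int) < (l.count k0 : Int) := by
      exact_mod_cast List.count_pos_iff.mpr hk0
    unfold pvMaxCount
    rw [hdl]
    simp only [List.foldl_cons, List.foldl_map]
    rw [max_eq_right hpos.le]

-- a block of equal chunks advances the run counter by its length
theorem pvRunLoopRepl (n : Nat) (c : String) (rest : List String) (r m : Int) (hrm : r ≤ m) :
    pvRunLoop (List.replicate n c ++ rest) (some c) r m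
      = pvRunLoop rest (some c) (r + n) (max m (r + n)) := by
  induction n generalizing r m with
  | zero => simp [max_eq_left hrm]
  | succ k ih =>
    simp only [List.replicate_succ, List.cons_append, pvRunLoop, if_true]
    have : (if r + 1 > m then r + 1 else m) = max m (r + 1) := by
      simp [max_def]; omega
    rw [this, ih (r + 1) (max m (r + 1)) (le_max_right _ _)]
    congr 1
    · push_cast; ring
    · push_cast; omega

-- a sorted list decomposes into its head's block and a head-free sorted tail
theorem pvSpan (t : List String) (c : String) (h : (c :: t).Pairwise (· ≤ ·)) :
    ∃ (n : Nat) (rest : List String), c :: t = List.replicate (n + 1) c ++ rest ∧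
      c ∉ rest ∧ rest.Pairwise (· ≤ ·) := by
  induction t with
  | nil => exact ⟨0, [], by simp, by simp, List.Pairwise.nil⟩
  | cons d t' ih =>
    rw [List.pairwise_cons] at h
    by_cases hdc : d = c
    · subst hdc
      obtain ⟨n, rest, heq, hnm, hp⟩ := ih h.2
      exact ⟨n + 1, rest, by rw [List.replicate_succ, List.cons_append, ← heq], hnm, hp⟩
    · refine ⟨0, d :: t', by simp, ?_, h.2⟩
      intro hc
      rcases List.mem_cons.mp hc with h1 | h2
      · exact hdc h1.symm
      · have hcd : c ≤ d := h.1 d (by simp)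
        have hdx : d ≤ c := (List.pairwise_cons.mp h.2).1 c h2
        exact hdc (le_antisymm hdx hcd)

-- the run scan over a sorted list computes max m (pvMaxCount s)
theorem pvRunLoopSorted (N : Nat) :
    ∀ (s : List String), s.length ≤ N → s.Pairwise (· ≤ ·) →
    ∀ (prev : Option String) (r m : Int), 0 ≤ m → r ≤ m →
      (∀ x ∈ s, prev ≠ some x) →
      pvRunLoop s prev r m = max m (pvMaxCount s) := by
  induction N with
  | zero =>
    intro s hlen _ prev r m hm _ _
    have : s = [] := List.eq_nil_of_length_eq_zero (Nat.le_zero.mp hlen)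
    subst this
    simp [pvRunLoop, pvMaxCount, max_eq_left hm]
  | succ N ih =>
    intro s hlen hsort prev r m hm hrm hprev
    cases s with
    | nil => simp [pvRunLoop, pvMaxCount, max_eq_left hm]
    | cons c t =>
      obtain ⟨n, rest, heq, hnm, hp⟩ := pvSpan t c hsort
      have ht : t = List.replicate n c ++ rest := by
        have h' := heq
        rw [List.replicate_succ, List.cons_append] at h'
        injection h'
      subst ht
      have hstep : pvRunLoop (c :: (List.replicate n c ++ rest)) prev r m
          = pvRunLoop (List.replicate n c ++ rest) (some c) 1 (max m 1) := by
        simp only [pvRunLoop]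
        have hne : ¬ (some c = prev) := fun h => hprev c (by simp) h.symm
        rw [if_neg hne]
        congr 1
        simp [max_def]; omega
      rw [hstep, pvRunLoopRepl n c rest 1 (max m 1) (le_max_right _ _)]
      have hrest : pvRunLoop rest (some c) (1 + n) (max (max m 1) (1 + n))
          = max (max (max m 1) (1 + n)) (pvMaxCount rest) := by
        refine ih rest ?_ hp (some c) (1 + n) (max (max m 1) (1 + n)) ?_ (le_max_right _ _) ?_
        · simp only [List.length_cons, List.length_append, List.length_replicate] at hlen
          omega
        · have h0 : (0 : Int) ≤ 1 + (n : Int) := by positivity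
          exact le_trans h0 (le_max_right _ _)
        · intro x hx hcx
          exact hnm (by rw [Option.some_inj] at hcx; rw [hcx]; exact hx)
      rw [hrest]
      -- pvMaxCount (c :: replicate n c ++ rest) = max (n+1) (pvMaxCount rest)
      have hperm : (c :: (List.replicate n c ++ rest)).Perm (List.replicate (n + 1) c ++ rest) := by
        rw [heq]
      have hcount_c : (c :: (List.replicate n c ++ rest)).count c = n + 1 := by
        rw [hperm.count_eq]
        simp [List.count_append, List.count_eq_zero_of_not_mem hnm]
      have hcount_rest : ∀ k ∈ rest,
          (c :: (List.replicate n c ++ rest)).count k = rest.count k := by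
        intro k hk
        have hkc : k ≠ c := fun h => hnm (h ▸ hk)
        rw [hperm.count_eq, List.count_append]
        simp [List.count_replicate, Ne.symm hkc]
      have hdedup : (PySem.List.dedup (c :: (List.replicate n c ++ rest))).Perm
          (c :: PySem.List.dedup rest) := by
        rw [List.perm_ext_iff_of_nodup (PySem.List.nodup_dedup _)
          (by simp only [List.nodup_cons]
              exact ⟨fun h => hnm ((PySem.List.mem_dedup _ _).mp h), PySem.List.nodup_dedup _⟩)]
        intro x
        simp only [PySem.List.mem_dedup, List.mem_cons, List.mem_append, List.mem_replicate]
        constructor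
        · rintro (h | ⟨-, h⟩ | h)
          · exact Or.inl h
          · exact Or.inl h
          · exact Or.inr h
        · rintro (h | h)
          · exact Or.inl h
          · exact Or.inr (Or.inr h)
      have hM : pvMaxCount (c :: (List.replicate n c ++ rest))
          = max ((n : Int) + 1) (pvMaxCount rest) := by
        unfold pvMaxCount
        have h1 : (PySem.List.dedup (c :: (List.replicate n c ++ rest))).foldl
            (fun acc k => max acc (((c :: (List.replicate n c ++ rest)).count k : Int))) 0
            = (c :: PySem.List.dedup rest).foldl
              (fun acc k => max acc (((c :: (List.replicate n c ++ rest)).count k : Int))) 0 := by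
          apply hdedup.foldl_eq'
          intro x _ y _ z
          simp only [max_assoc]
          rw [max_comm (((c :: (List.replicate n c ++ rest)).count x : Int))]
        rw [h1]
        simp only [List.foldl_cons]
        have h2 : (PySem.List.dedup rest).foldl
            (fun acc k => max acc (((c :: (List.replicate n c ++ rest)).count k : Int)))
              (max 0 ((c :: (List.replicate n c ++ rest)).count c : Int))
            = (PySem.List.dedup rest).foldl
              (fun acc k => max acc ((rest.count k : Int)))
              (max 0 ((c :: (List.replicate n c ++ rest)).count c : Int)) := by
          apply PySem.List.foldl_congr_mem
          intro acc k hk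
          rw [hcount_rest k ((PySem.List.mem_dedup _ _).mp hk)]
        rw [h2, hcount_c]
        have h3 : (max 0 ((n + 1 : Nat) : Int)) = max ((n : Int) + 1) 0 := by
          push_cast; rw [max_comm]
        rw [h3, pvFoldlMaxInit]
      rw [hM]
      have hMr : 0 ≤ pvMaxCount rest := pvMaxCount_nonneg rest
      omega

theorem pvBSide (l : List String) :
    pvRunLoop (PySem.List.sorted l (fun x => x) false) none 0 0 = pvMaxCount l := by
  have hs := PySem.List.sorted_pairwise l (fun x => x)
  have hperm := PySem.List.sorted_perm l (fun x => x) false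
  rw [pvRunLoopSorted (PySem.List.sorted l (fun x => x) false).length
    (PySem.List.sorted l (fun x => x) false) le_rfl hs none 0 0 le_rfl le_rfl
    (by intro x _ h; simp at h)]
  rw [pvMaxCount_perm hperm]
  exact max_eq_right (pvMaxCount_nonneg l)

-- ===== VERDICT (by name: the statement is the Claim_ definition above) =====
theorem detect_pattern_stuffing_py_spec : Claim_equal_detect_pattern_stuffing_py := by
  intro text _
  unfold Spec_detect_pattern_stuffing_py detect_pattern_stuffing_py detect_pattern_stuffing_py_alt
  by_cases h : PySem.Str.len text < 100
  · rw [if_pos h, if_pos h]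
  · rw [if_neg h, if_neg h]
    simp only []
    rw [pvASide, pvBSide]
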